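-- pv_equiv track=rewrite | github.com/Huawei/Server_Management_Plugin_Ansible | ibmc_ansible/ibmc_redfish_api/api_manage_ibmc_ip.py | convert_ipv4_addr
-- ===== SOURCE A (Python) =====
-- IP_DICT = {
--     "ipv4andipv6": "IPv4AndIPv6",
--     "ipv4": "IPv4",
--     "ipv6": "IPv6",
--     "static": "Static",
--     "dhcp": "DHCP",
--     "dhcpv6": "DHCPv6"
-- }
--
-- def convert_ipv4_addr(ipv4_address_list):
--     """
--
--     Function:
--         Convert IPv4 address format
--     Args:
--               ipv4_address_list            (list):   IPv4 address list
--     Returns: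
--         list
--     Raises:
--         None
--     Examples:
--         None
--     Author:
--     Date: 2019/10/26 22:25
--     """
--     result_list = []
--     for ipv4_addr in ipv4_address_list:
--         result_dict = {}
--         address = ipv4_addr.get("address")
--         gateway = ipv4_addr.get("gateway")
--         subnet_mask = ipv4_addr.get("subnet_mask")
--         address_origin = ipv4_addr.get("address_origin")
--         if address:
--             result_dict["Address"] = address
--         if gateway:
--             result_dict["Gateway"] = gateway
--         if subnet_mask:
--             result_dict["SubnetMask"] = subnet_mask
--         if address_origin:
--             result_dict["AddressOrigin"] = IP_DICT.get(
--                 str(address_origin).lower())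
--         result_list.append(result_dict)
--     return result_list
-- ===== SOURCE B (Python) =====
-- IP_DICT = {
--     "ipv4andipv6": "IPv4AndIPv6",
--     "ipv4": "IPv4",
--     "ipv6": "IPv6",
--     "static": "Static",
--     "dhcp": "DHCP",
--     "dhcpv6": "DHCPv6"
-- }
--
--
-- def _column(rows, src, out, translate):
--     """One column of the output: for every row, the (output key, value) cell
--     this source field contributes, or None when the field is absent/falsy."""
--     col = []
--     for row in rows:
--         v = row.get(src)
--         if v:
--             col.append((out, IP_DICT.get(str(v).lower()) if translate else v))
--         else:
--             col.append(None)
--     return col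
--
--
-- def convert_ipv4_addr(ipv4_address_list):
--     # columnar strategy: one pass per field over the whole list, then transpose
--     a = _column(ipv4_address_list, "address", "Address", False)
--     g = _column(ipv4_address_list, "gateway", "Gateway", False)
--     s = _column(ipv4_address_list, "subnet_mask", "SubnetMask", False)
--     o = _column(ipv4_address_list, "address_origin", "AddressOrigin", True)
--     return [dict(c for c in cells if c is not None)
--             for cells in zip(a, g, s, o)]
-- ===== Notes on version B (the rewrite author's own statement) =====
-- stated objective: alternative
-- what changed: B is columnar: it makes one staged pass per field over the whole list (building a column of optional output cells), then transposes the four columns with zip and assembles each row's dict from its non-None cells, instead of A's single row-wise pass with four per-row branches.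
import Mathlib
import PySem

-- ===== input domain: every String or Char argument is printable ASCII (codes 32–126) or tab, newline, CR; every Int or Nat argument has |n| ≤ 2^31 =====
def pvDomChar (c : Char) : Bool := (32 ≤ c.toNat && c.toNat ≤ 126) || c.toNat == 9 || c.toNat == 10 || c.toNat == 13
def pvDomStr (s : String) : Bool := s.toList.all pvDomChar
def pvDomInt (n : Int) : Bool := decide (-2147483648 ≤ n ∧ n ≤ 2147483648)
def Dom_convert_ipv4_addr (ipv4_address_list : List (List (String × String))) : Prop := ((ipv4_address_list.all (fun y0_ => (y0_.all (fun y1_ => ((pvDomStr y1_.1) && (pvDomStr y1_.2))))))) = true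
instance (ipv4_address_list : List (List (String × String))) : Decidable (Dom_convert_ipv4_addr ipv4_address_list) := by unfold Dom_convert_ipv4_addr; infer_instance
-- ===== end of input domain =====

-- B replaces A's single row-wise pass (four branches per row) by a columnar strategy: one staged
-- pass per field producing a column of optional cells, then a zip-transpose assembling each row
-- (objective: alternative). Equivalence of the return value is proved on Pre_ below.

-- IP_DICT (module constant)
def ipDict : PySem.Dict String String := PySem.Dict.mk
  [("ipv4andipv6", "IPv4AndIPv6"), ("ipv4", "IPv4"), ("ipv6", "IPv6"),
   ("static", "Static"), ("dhcp", "DHCP"), ("dhcpv6", "DHCPv6")]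

-- ===== PORT A =====
-- Literal transliteration of A: for each dict, fetch the four fields, append each truthy one
-- under its output key in the fixed order.  Where Python stores IP_DICT.get(...) = None (lookup
-- miss) the port stores "" — exactly those inputs are excluded by Pre_ (None is not a String).
def convert_ipv4_addr (ipv4_address_list : List (List (String × String))) : List (List (String × String)) :=
  ipv4_address_list.foldl (fun result_list ipv4_addr =>
    let d := PySem.Dict.mk ipv4_addr
    let address := d.get? "address"
    let gateway := d.get? "gateway"
    let subnet_mask := d.get? "subnet_mask"
    let address_origin := d.get? "address_origin"
    let result_dict : List (String × String) := []
    let result_dict := match address with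
      | some v => if v = "" then result_dict else result_dict ++ [("Address", v)]
      | none => result_dict
    let result_dict := match gateway with
      | some v => if v = "" then result_dict else result_dict ++ [("Gateway", v)]
      | none => result_dict
    let result_dict := match subnet_mask with
      | some v => if v = "" then result_dict else result_dict ++ [("SubnetMask", v)]
      | none => result_dict
    let result_dict := match address_origin with
      | some v => if v = "" then result_dict else
          result_dict ++ [("AddressOrigin", (ipDict.get? (PySem.Str.lower v)).getD "")]
      | none => result_dict
    result_list ++ [result_dict]) []

-- ===== PORT B =====
-- one column of the output: per row, the optional (output key, value) cell of one source field
def pvColumn (rows : List (List (String × String))) (src out : String) (translate : Bool) :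
    List (Option (String × String)) :=
  rows.foldl (fun col row =>
    match (PySem.Dict.mk row).get? src with
    | some v =>
        if v = "" then col ++ [none]
        else col ++ [some (out, if translate then (ipDict.get? (PySem.Str.lower v)).getD "" else v)]
    | none => col ++ [none]) []

-- zip of the four columns + per-row dict comprehension over the non-None cells
def pvZipRows : List (Option (String × String)) → List (Option (String × String)) →
    List (Option (String × String)) → List (Option (String × String)) → List (List (String × String))
  | a :: as_, g :: gs, s :: ss, o :: os =>
      (([a, g, s, o].filterMap id)) :: pvZipRows as_ gs ss os
  | _, _, _, _ => []

def convert_ipv4_addr_alt (ipv4_address_list : List (List (String × String))) : List (List (String × String)) :=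
  pvZipRows
    (pvColumn ipv4_address_list "address" "Address" false)
    (pvColumn ipv4_address_list "gateway" "Gateway" false)
    (pvColumn ipv4_address_list "subnet_mask" "SubnetMask" false)
    (pvColumn ipv4_address_list "address_origin" "AddressOrigin" true)

-- ===== PRECONDITION & SPEC =====
-- Pre_ excludes inputs where a dict has a truthy "address_origin" whose lowercase form is not an
-- IP_DICT key: there Python A (and B) return a dict containing None, which is not a String value.
def Pre_convert_ipv4_addr (ipv4_address_list : List (List (String × String))) : Prop :=
  (ipv4_address_list.all (fun ipv4_addr =>
    match (PySem.Dict.mk ipv4_addr).get? "address_origin" with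
    | some v => v == "" || (ipDict.get? (PySem.Str.lower v)).isSome
    | none => true)) = true
instance (ipv4_address_list : List (List (String × String))) : Decidable (Pre_convert_ipv4_addr ipv4_address_list) := by unfold Pre_convert_ipv4_addr; infer_instance

def pvWitness_convert_ipv4_addr : (List (List (String × String))) :=
  [[("address", "10.0.0.1"), ("gateway", "10.0.0.254"), ("subnet_mask", "255.255.255.0"), ("address_origin", "Static")],
   [("address", ""), ("address_origin", "DHCP")], []]

def Spec_convert_ipv4_addr (ipv4_address_list : List (List (String × String))) (out : List (List (String × String))) : Prop := out = convert_ipv4_addr_alt ipv4_address_list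
instance (ipv4_address_list : List (List (String × String))) (out : List (List (String × String))) : Decidable (Spec_convert_ipv4_addr ipv4_address_list out) := by unfold Spec_convert_ipv4_addr; infer_instance

-- ===== CLAIM (what is proved, stated in full; the proofs are below) =====
def Claim_equal_convert_ipv4_addr : Prop := ∀ (ipv4_address_list : List (List (String × String))), Dom_convert_ipv4_addr ipv4_address_list → Pre_convert_ipv4_addr ipv4_address_list → Spec_convert_ipv4_addr ipv4_address_list (convert_ipv4_addr ipv4_address_list)

-- ===== LEMMAS AND PROOFS =====

-- the cell one field contributes for one row
def pvCell (row : List (String × String)) (src out : String) (translate : Bool) :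
    Option (String × String) :=
  match (PySem.Dict.mk row).get? src with
  | some v =>
      if v = "" then none
      else some (out, if translate then (ipDict.get? (PySem.Str.lower v)).getD "" else v)
  | none => none

lemma pvColumn_eq_map (rows : List (List (String × String))) (src out : String) (translate : Bool) :
    pvColumn rows src out translate = rows.map (fun row => pvCell row src out translate) := by
  unfold pvColumn
  rw [show (fun (col : List (Option (String × String))) row =>
        match (PySem.Dict.mk row).get? src with
        | some v =>
            if v = "" then col ++ [none]
            else col ++ [some (out, if translate then (ipDict.get? (PySem.Str.lower v)).getD "" else v)]
        | none => col ++ [none]) =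
      (fun col row => col ++ [pvCell row src out translate]) from ?_]
  · induction rows using List.reverseRecOn with
    | nil => simp
    | append_singleton xs x ih => simp [ih]
  · funext col row
    unfold pvCell
    cases (PySem.Dict.mk row).get? src <;> simp <;> split_ifs <;> simp

lemma pvZipRows_map (rows : List (List (String × String)))
    (f g s o : List (String × String) → Option (String × String)) :
    pvZipRows (rows.map f) (rows.map g) (rows.map s) (rows.map o) =
      rows.map (fun r => [f r, g r, s r, o r].filterMap id) := by
  induction rows with
  | nil => rfl
  | cons x xs ih => simp [pvZipRows, ih]

-- per element, A's four-branch body equals B's row of non-None cells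
lemma row_eq (ipv4_addr : List (String × String)) :
    (let d := PySem.Dict.mk ipv4_addr
     let address := d.get? "address"
     let gateway := d.get? "gateway"
     let subnet_mask := d.get? "subnet_mask"
     let address_origin := d.get? "address_origin"
     let result_dict : List (String × String) := []
     let result_dict := match address with
       | some v => if v = "" then result_dict else result_dict ++ [("Address", v)]
       | none => result_dict
     let result_dict := match gateway with
       | some v => if v = "" then result_dict else result_dict ++ [("Gateway", v)]
       | none => result_dict
     let result_dict := match subnet_mask with
       | some v => if v = "" then result_dict else result_dict ++ [("SubnetMask", v)]
       | none => result_dict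
     let result_dict := match address_origin with
       | some v => if v = "" then result_dict else
           result_dict ++ [("AddressOrigin", (ipDict.get? (PySem.Str.lower v)).getD "")]
       | none => result_dict
     result_dict) =
    [pvCell ipv4_addr "address" "Address" false,
     pvCell ipv4_addr "gateway" "Gateway" false,
     pvCell ipv4_addr "subnet_mask" "SubnetMask" false,
     pvCell ipv4_addr "address_origin" "AddressOrigin" true].filterMap id := by
  simp only [pvCell]
  cases (PySem.Dict.mk ipv4_addr).get? "address" <;>
  cases (PySem.Dict.mk ipv4_addr).get? "gateway" <;>
  cases (PySem.Dict.mk ipv4_addr).get? "subnet_mask" <;>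
  cases (PySem.Dict.mk ipv4_addr).get? "address_origin" <;>
  simp [List.filterMap] <;> split_ifs <;> simp

-- ===== VERDICT (by name: the statement is the Claim_ definition above) =====
theorem convert_ipv4_addr_spec : Claim_equal_convert_ipv4_addr := by
  intro xs _ _
  unfold Spec_convert_ipv4_addr convert_ipv4_addr convert_ipv4_addr_alt
  rw [pvColumn_eq_map, pvColumn_eq_map, pvColumn_eq_map, pvColumn_eq_map, pvZipRows_map,
    PySem.List.foldl_append_singleton_eq_map]
  exact List.map_congr_left (fun a _ => row_eq a)
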